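-- pv_equiv track=rewrite | github.com/GEM-benchmark/NL-Augmenter | transformations/GermanGenderSwap/transformation.py | replace_personal
-- ===== SOURCE A (Python) =====
-- import string
--
-- def replace_punc(text):
--     for i in string.punctuation:
--         text = text.replace(i, " " + i)
--     return text
--
-- def get_index(wl, n):
--     indices = [i for i, x in enumerate(wl) if x == n]
--     return indices
--
-- def replace_name_in_list(ind, text, noundict):
--     t2 = text
--     for i in ind:
--         t2[i] = noundict[t2[i]]
--     return t2
--
-- def replace_personal(inp, personalp):
--     i = replace_punc(inp)
--     text = i.split()
--     for name in personalp.keys():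
--         if name in text:
--             ind = get_index(text, name)
--             newtext = replace_name_in_list(ind, text, personalp)
--         else:
--             newtext = text
--     newtext = " ".join(str(x) for x in newtext)
--     return newtext
-- ===== SOURCE B (Python) =====
-- import string
--
-- _SPACER = str.maketrans({c: " " + c for c in string.punctuation})
--
-- def replace_personal(inp, personalp):
--     # compose the sequential per-key substitution into one token map (reverse pass)
--     comp = {}
--     for k, v in reversed(list(personalp.items())):
--         comp[k] = comp.get(v, v)
--     tokens = inp.translate(_SPACER).split()
--     return " ".join(map(comp.get, tokens, tokens))
-- ===== Notes on version B (the rewrite author's own statement) =====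
-- stated objective: alternative
-- what changed: A re-scans the token list once per dict key (membership test, index collection, then assignment at each index); B composes all rules into one substitution dict by a single reverse pass over the rules and then maps every token once through that dict.
import Mathlib
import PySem

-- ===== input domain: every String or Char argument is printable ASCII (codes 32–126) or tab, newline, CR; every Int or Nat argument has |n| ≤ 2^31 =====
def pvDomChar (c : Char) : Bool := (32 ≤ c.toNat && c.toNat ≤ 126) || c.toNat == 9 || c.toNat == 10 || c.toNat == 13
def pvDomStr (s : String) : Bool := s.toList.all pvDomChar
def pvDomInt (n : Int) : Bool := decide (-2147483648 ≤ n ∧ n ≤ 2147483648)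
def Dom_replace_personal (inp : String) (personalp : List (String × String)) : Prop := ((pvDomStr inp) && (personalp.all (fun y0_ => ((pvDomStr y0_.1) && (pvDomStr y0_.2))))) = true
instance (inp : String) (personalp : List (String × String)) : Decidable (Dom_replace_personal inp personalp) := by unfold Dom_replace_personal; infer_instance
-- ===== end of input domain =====

-- B replaces A's per-key passes over the token list by ONE composed substitution dict
-- (built by a reverse pass over the rules) and a single pass over the tokens.
-- A mutates no argument observable by the caller (dicts/strings are read only).

-- ===== PORT A =====

-- string.punctuation
def pvPunct : List Char := "!\"#$%&'()*+,-./:;<=>?@[\\]^_`{|}~".toList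

-- replace_punc: text = text.replace(i, " " + i) for each punctuation char i
def pvReplacePunc (text : String) : String :=
  pvPunct.foldl (fun t c => PySem.Str.replace t (String.ofList [c]) (String.ofList [' ', c])) text

-- get_index: [i for i, x in enumerate(wl) if x == n]
def pvGetIndex (wl : List String) (n : String) : List Int :=
  (PySem.List.enumerate wl).filterMap (fun p => if p.2 = n then some p.1 else none)

-- replace_name_in_list: for i in ind: t2[i] = noundict[t2[i]]
-- (indices come from enumerate, hence 0 ≤ i < len; the dict lookup is of a key
--  present in the dict, so the "" defaults are never used)
def pvReplaceNameInList (ind : List Int) (text : List String) (noundict : PySem.Dict String String) : List String :=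
  ind.foldl (fun t2 i => t2.set i.toNat (noundict.getD (t2.getD i.toNat "") "")) text

def replace_personal (inp : String) (personalp : List (String × String)) : String :=
  let d := PySem.Dict.ofList personalp          -- personalp IS a dict in Python
  let i := pvReplacePunc inp
  let text := PySem.Str.split₀ i
  -- for name in d.keys(): replace in place (text is mutated, so the state threads)
  let newtext := d.keys.foldl
    (fun text name => if name ∈ text then pvReplaceNameInList (pvGetIndex text name) text d else text)
    text
  PySem.Str.join " " newtext

-- ===== PORT B =====

def pvPunctSet : PySem.Set Char := PySem.Set.ofList pvPunct

-- spaced = "".join(" " + c if c in _PUNCT else c for c in inp)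
def pvSpaced (cs : List Char) : List Char :=
  cs.flatMap (fun c => if c ∈ pvPunctSet then [' ', c] else [c])

-- comp = {}; for k, v in reversed(list(personalp.items())): comp[k] = comp.get(v, v)
def pvComp (personalp : List (String × String)) : PySem.Dict String String :=
  ((PySem.Dict.ofList personalp).items.reverse).foldl
    (fun c kv => c.insert kv.1 (c.getD kv.2 kv.2)) PySem.Dict.empty

def replace_personal_alt (inp : String) (personalp : List (String × String)) : String :=
  let comp := pvComp personalp
  let tokens := PySem.Str.split₀ (String.ofList (pvSpaced inp.toList))
  PySem.Str.join " " (tokens.map (fun t => comp.getD t t))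

-- ===== PRECONDITION & SPEC =====
-- On an empty dict A's variable `newtext` is never assigned and A raises UnboundLocalError.
def Pre_replace_personal (inp : String) (personalp : List (String × String)) : Prop :=
  personalp ≠ []
instance (inp : String) (personalp : List (String × String)) : Decidable (Pre_replace_personal inp personalp) := by unfold Pre_replace_personal; infer_instance

def pvWitness_replace_personal : String × (List (String × String)) :=
  ("Er sagt, dass er kommt.", [("er", "sie"), ("sie", "er"), ("Er", "Sie")])

def Spec_replace_personal (inp : String) (personalp : List (String × String)) (out : String) : Prop := out = replace_personal_alt inp personalp
instance (inp : String) (personalp : List (String × String)) (out : String) : Decidable (Spec_replace_personal inp personalp out) := by unfold Spec_replace_personal; infer_instance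

-- ===== CLAIM (what is proved, stated in full; the proofs are below) =====
def Claim_equal_replace_personal : Prop := ∀ (inp : String) (personalp : List (String × String)), Dom_replace_personal inp personalp → Pre_replace_personal inp personalp → Spec_replace_personal inp personalp (replace_personal inp personalp)

-- ===== LEMMAS AND PROOFS =====

-- ---- tokenisation: the 32 sequential replaces equal B's one-pass space insertion ----

lemma pv_go_single (c : Char) (new : List Char) : ∀ (l : List Char) (fuel : Nat) (acc : List Char), l.length ≤ fuel →
    PySem.Chars.replace.go [c] new fuel l acc = acc.reverse ++ l.flatMap (fun ch => if ch = c then new else [ch]) := by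
  intro l
  induction l with
  | nil => intro fuel acc h; cases fuel <;> simp [PySem.Chars.replace.go]
  | cons ch t ih =>
    intro fuel acc h
    cases fuel with
    | zero => simp at h
    | succ f =>
      rw [PySem.Chars.replace.go]
      by_cases hc : ch = c
      · subst hc
        simp only [List.isPrefixOf, BEq.rfl, Bool.true_and, if_true, List.length_cons,
          List.drop_succ_cons, List.length_nil, List.drop_zero]
        rw [ih f _ (by simpa using h)]
        simp
      · have hp : [c].isPrefixOf (ch :: t) = false := by
          simp [List.isPrefixOf]; exact fun h => absurd h.symm hc
        rw [hp]
        simp only [Bool.false_eq_true, if_false]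
        rw [ih f _ (by simpa using h)]
        simp [hc]

lemma pv_replace_single (c : Char) (new : List Char) (s : List Char) :
    PySem.Chars.replace s [c] new = s.flatMap (fun ch => if ch = c then new else [ch]) := by
  rw [PySem.Chars.replace]
  simp [pv_go_single c new s s.length [] (le_refl _)]

-- after folding the replaces for the chars of S, every char of S carries its space
lemma pv_fold_repl (l : List Char) : ∀ (S : List Char) (t0 : List Char),
    (∀ c ∈ l, c ∉ S) → ' ' ∉ l → l.Nodup →
    l.foldl (fun t c => PySem.Chars.replace t [c] [' ', c])
        (t0.flatMap (fun ch => if ch ∈ S then [' ', ch] else [ch]))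
      = t0.flatMap (fun ch => if ch ∈ S ++ l then [' ', ch] else [ch]) := by
  induction l with
  | nil => intro S t0 _ _ _; simp
  | cons c l' ih =>
    intro S t0 hS hsp hnd
    simp only [List.foldl_cons]
    rw [pv_replace_single, List.flatMap_assoc]
    have hstep : ∀ ch : Char,
        ((if ch ∈ S then [' ', ch] else [ch]).flatMap (fun x => if x = c then [' ', c] else [x]))
          = (if ch ∈ S ++ [c] then [' ', ch] else [ch]) := by
      intro ch
      by_cases hmem : ch ∈ S
      · have hne : ch ≠ c := fun h => (hS c (by simp)) (h ▸ hmem)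
        have hspc : (' ' : Char) ≠ c := fun h => hsp (List.mem_cons.mpr (Or.inl h))
        simp [hmem, hne, hspc]
      · by_cases hc : ch = c
        · subst hc; simp [hmem]
        · simp [hmem, hc]
    have : (t0.flatMap fun ch => (if ch ∈ S then [' ', ch] else [ch]).flatMap
              (fun x => if x = c then [' ', c] else [x]))
         = t0.flatMap (fun ch => if ch ∈ S ++ [c] then [' ', ch] else [ch]) := by
      apply List.flatMap_congr; intro ch _; exact hstep ch
    rw [this, ih (S ++ [c]) t0
      (by intro x hx; simp only [List.mem_append, List.mem_singleton]
          rintro (h | h)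
          · exact hS x (by simp [hx]) h
          · exact (List.nodup_cons.mp hnd).1 (h ▸ hx))
      (fun h => hsp (List.mem_cons.mpr (Or.inr h))) (List.nodup_cons.mp hnd).2]
    have harr : ∀ ch : Char, (ch ∈ S ++ [c] ++ l') ↔ (ch ∈ S ++ c :: l') := by
      intro ch; simp only [List.mem_append, List.mem_cons]; tauto
    apply List.flatMap_congr; intro ch _
    by_cases h : ch ∈ S ++ [c] ++ l'
    · rw [if_pos h, if_pos ((harr ch).mp h)]
    · rw [if_neg h, if_neg (fun hh => h ((harr ch).mpr hh))]

lemma pv_fold_toList (l : List Char) : ∀ (s : String),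
    (l.foldl (fun t c => PySem.Str.replace t (String.ofList [c]) (String.ofList [' ', c])) s).toList
      = l.foldl (fun t c => PySem.Chars.replace t [c] [' ', c]) s.toList := by
  induction l with
  | nil => intro s; simp
  | cons c l' ih =>
    intro s
    simp only [List.foldl_cons]
    rw [ih]
    congr 1
    rw [PySem.Str.toList_replace]
    simp

lemma pv_spaced_eq (inp : String) :
    (pvReplacePunc inp).toList = pvSpaced inp.toList := by
  unfold pvReplacePunc
  rw [pv_fold_toList]
  have h0 : inp.toList = inp.toList.flatMap (fun ch => if ch ∈ ([] : List Char) then [' ', ch] else [ch]) := by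
    simp
  conv_lhs => rw [h0]
  rw [pv_fold_repl pvPunct [] inp.toList (fun _ _ h => List.not_mem_nil h) (by decide) (by decide)]
  unfold pvSpaced
  apply List.flatMap_congr
  intro c _
  by_cases hc : c ∈ pvPunct
  · rw [if_pos (by simpa using hc), if_pos (by simp [pvPunctSet, PySem.Set.mem_ofList, hc])]
  · rw [if_neg (by simpa using hc), if_neg (by simp [pvPunctSet, PySem.Set.mem_ofList, hc])]

-- ---- the sequential per-key substitution, as a function on one token ----

def pvApplySeq : List (String × String) → String → String
  | [], t => t
  | (k, v) :: ps, t => pvApplySeq ps (if t = k then v else t)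

-- ---- A side: one key's pass is a map over the tokens ----

lemma pv_mem_getIndex (text : List String) (k : String) (j : Nat) :
    (↑j : Int) ∈ pvGetIndex text k ↔ ∃ h : j < text.length, text[j] = k := by
  unfold pvGetIndex
  simp only [List.mem_filterMap, PySem.List.mem_enumerate_iff]
  constructor
  · rintro ⟨⟨i, x⟩, ⟨kk, hk, hpx⟩, hif⟩
    rw [Prod.mk.injEq] at hpx
    obtain ⟨h1, h2⟩ := hpx
    subst h1; subst h2
    by_cases hx : text[kk] = k
    · simp only [hx, if_pos] at hif
      have hkj : kk = j := by
        have := Option.some.inj hif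
        omega
      subst hkj
      exact ⟨hk, hx⟩
    · simp [hx] at hif
  · rintro ⟨h, hx⟩
    exact ⟨((0 : Int) + ↑j, text[j]), ⟨j, h, rfl⟩, by simp [hx]⟩

lemma pv_nodup_getIndex (text : List String) (k : String) : (pvGetIndex text k).Nodup := by
  unfold pvGetIndex
  have hpw : (PySem.List.enumerate text 0).Pairwise (fun p q => p.1 < q.1) :=
    PySem.List.pairwise_lt_enumerate text 0
  have : (List.filterMap (fun p => if p.2 = k then some p.1 else none) (PySem.List.enumerate text 0)).Pairwise (· < ·) := by
    apply List.Pairwise.filterMap _ ?_ hpw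
    intro a b ha hb hab
    by_cases h1 : a.2 = k <;> by_cases h2 : b.2 = k <;>
      simp_all
  exact this.imp ne_of_lt

lemma pv_setfold (d : PySem.Dict String String) (k : String) :
    ∀ (I : List Int) (t2 : List String), I.Nodup →
    (∀ i ∈ I, ∃ kk : Nat, i = (↑kk : Int) ∧ kk < t2.length ∧ t2[kk]? = some k) →
    ∀ j : Nat,
      (I.foldl (fun t2 i => t2.set i.toNat (d.getD (t2.getD i.toNat "") "")) t2)[j]? =
        if (↑j : Int) ∈ I then some (d.getD k "") else t2[j]? := by
  intro I
  induction I with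
  | nil => intro t2 _ _ j; simp
  | cons i0 I' ih =>
    intro t2 hnd hmem j
    obtain ⟨k0, hk0, hlt, hget⟩ := hmem i0 (by simp)
    subst hk0
    simp only [List.foldl_cons]
    have hgd : t2.getD ((↑k0 : Int)).toNat "" = k := by
      simp only [Int.toNat_natCast, List.getD_eq_getElem?_getD, hget, Option.getD_some]
    rw [hgd]
    set t2' := t2.set ((↑k0 : Int)).toNat (d.getD k "") with ht2'
    have hlen : t2'.length = t2.length := by simp [ht2']
    have hmem' : ∀ i ∈ I', ∃ kk : Nat, i = (↑kk : Int) ∧ kk < t2'.length ∧ t2'[kk]? = some k := by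
      intro i hi
      obtain ⟨kk, rfl, hlt2, hg2⟩ := hmem i (by simp [hi])
      refine ⟨kk, rfl, by omega, ?_⟩
      have hne : kk ≠ k0 := by
        intro h; exact (List.nodup_cons.mp hnd).1 (by simpa [h] using hi)
      rw [ht2']
      simp only [Int.toNat_natCast]
      rw [List.getElem?_set_ne (by omega)]
      exact hg2
    rw [ih t2' (List.nodup_cons.mp hnd).2 hmem' j]
    by_cases hj : (↑j : Int) ∈ (↑k0 : Int) :: I'
    · rcases (by simpa using hj : (j : Int) = (k0 : Int) ∨ (↑j : Int) ∈ I') with h | h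
      · have : j = k0 := by exact_mod_cast h
        subst this
        by_cases hIn : (↑j : Int) ∈ I'
        · simp [hIn]
        · simp only [hIn, if_false]
          rw [ht2']
          simp only [Int.toNat_natCast]
          rw [List.getElem?_set_self (by omega)]
          simp
      · simp [h, List.mem_cons]
    · have h1 : ¬ ((↑j : Int) ∈ I') := fun h => hj (by simp [h])
      have h2 : (j : Int) ≠ (k0 : Int) := fun h => hj (by simp [h])
      have hjk : j ≠ k0 := fun h => h2 (by exact_mod_cast h)
      rw [if_neg h1, if_neg hj, ht2']
      simp only [Int.toNat_natCast]
      rw [List.getElem?_set_ne (by omega)]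

lemma pv_stepA (d : PySem.Dict String String) (hnd : d.keys.Nodup) {k v : String}
    (hkv : (k, v) ∈ d.items) (text : List String) :
    (if k ∈ text then pvReplaceNameInList (pvGetIndex text k) text d else text) =
      text.map (fun t => if t = k then v else t) := by
  have hval : d.getD k "" = v := PySem.Dict.getD_of_mem_items d hkv hnd ""
  by_cases hk : k ∈ text
  · rw [if_pos hk]
    unfold pvReplaceNameInList
    apply List.ext_getElem?
    intro j
    rw [pv_setfold d k (pvGetIndex text k) text (pv_nodup_getIndex text k) ?side j]
    case side =>
      intro i hi
      unfold pvGetIndex at hi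
      simp only [List.mem_filterMap, PySem.List.mem_enumerate_iff] at hi
      obtain ⟨⟨a, x⟩, ⟨kk, hk2, hpx⟩, hif⟩ := hi
      rw [Prod.mk.injEq] at hpx
      obtain ⟨h1, h2⟩ := hpx
      subst h1; subst h2
      by_cases hx : text[kk] = k
      · simp only [hx, if_pos] at hif
        refine ⟨kk, ?_, hk2, by rw [List.getElem?_eq_getElem hk2]; simp [hx]⟩
        have := Option.some.inj hif
        omega
      · simp [hx] at hif
    by_cases hj : j < text.length
    · by_cases hx : text[j] = k
      · rw [if_pos ((pv_mem_getIndex text k j).mpr ⟨hj, hx⟩)]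
        rw [List.getElem?_map, List.getElem?_eq_getElem hj]
        simp [hx, hval]
      · have hnm : ¬ ((↑j : Int) ∈ pvGetIndex text k) := by
          rw [pv_mem_getIndex]; rintro ⟨h, hh⟩; exact hx hh
        rw [if_neg hnm, List.getElem?_map, List.getElem?_eq_getElem hj]
        simp [hx]
    · have hnm : ¬ ((↑j : Int) ∈ pvGetIndex text k) := by
        rw [pv_mem_getIndex]; rintro ⟨h, _⟩; omega
      rw [if_neg hnm, List.getElem?_map,
        List.getElem?_eq_none (by omega : text.length ≤ j)]
      simp
  · rw [if_neg hk]
    have : text.map (fun t => if t = k then v else t) = text.map id :=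
      List.map_congr_left (fun t ht => if_neg (fun h => hk (by rw [← h]; exact ht)))
    rw [this, List.map_id]

lemma pv_loopA (d : PySem.Dict String String) (hnd : d.keys.Nodup) :
    ∀ (ps : List (String × String)), (∀ p ∈ ps, p ∈ d.items) →
    ∀ (text : List String),
    (ps.map Prod.fst).foldl
        (fun text name => if name ∈ text then pvReplaceNameInList (pvGetIndex text name) text d else text)
        text
      = text.map (pvApplySeq ps) := by
  intro ps
  induction ps with
  | nil => intro _ text; simp [pvApplySeq]
  | cons p ps' ih =>
    intro hsub text
    obtain ⟨k, v⟩ := p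
    simp only [List.map_cons, List.foldl_cons]
    rw [pv_stepA d hnd (hsub (k, v) (by simp)) text]
    rw [ih (fun q hq => hsub q (by simp [hq])) _]
    rw [List.map_map]
    apply List.map_congr_left
    intro t _
    simp [pvApplySeq, Function.comp]

-- ---- B side: comp's lookup is the composed sequential substitution ----

lemma pv_comp_lookup_r (ps : List (String × String)) (t : String) :
    (ps.foldr (fun kv c => c.insert kv.1 (c.getD kv.2 kv.2)) (PySem.Dict.empty : PySem.Dict String String)).getD t t
      = pvApplySeq ps t := by
  induction ps generalizing t with
  | nil => simp [pvApplySeq, PySem.Dict.getD_empty]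
  | cons p ps' ih =>
    obtain ⟨k, v⟩ := p
    simp only [List.foldr_cons, pvApplySeq]
    by_cases ht : t = k
    · subst ht
      rw [if_pos rfl]
      unfold PySem.Dict.getD
      rw [PySem.Dict.get?_insert_self]
      simp only [Option.getD_some]
      exact ih v
    · rw [if_neg ht]
      unfold PySem.Dict.getD
      rw [PySem.Dict.get?_insert_of_ne _ _ ht]
      exact ih t

lemma pv_comp_lookup (ps : List (String × String)) (t : String) :
    ((ps.reverse).foldl (fun c kv => c.insert kv.1 (c.getD kv.2 kv.2)) (PySem.Dict.empty : PySem.Dict String String)).getD t t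
      = pvApplySeq ps t := by
  rw [List.foldl_reverse]
  exact pv_comp_lookup_r ps t

-- ===== VERDICT (by name: the statement is the Claim_ definition above) =====
theorem replace_personal_spec : Claim_equal_replace_personal := by
  intro inp personalp _ _
  unfold Spec_replace_personal
  have hstr : pvReplacePunc inp = String.ofList (pvSpaced inp.toList) := by
    have h := congrArg String.ofList (pv_spaced_eq inp)
    rwa [String.ofList_toList] at h
  simp only [replace_personal, replace_personal_alt]
  rw [hstr]
  have hkeys : (PySem.Dict.ofList personalp).keys
      = ((PySem.Dict.ofList personalp).items).map Prod.fst := rfl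
  rw [hkeys, pv_loopA (PySem.Dict.ofList personalp) (PySem.Dict.nodup_keys_ofList personalp)
    ((PySem.Dict.ofList personalp).items) (fun _ hp => hp)]
  exact congrArg (PySem.Str.join " ")
    (List.map_congr_left (fun t _ => (pv_comp_lookup ((PySem.Dict.ofList personalp).items) t).symm))
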